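-- pv_equiv track=rewrite | github.com/UAPROGRAMER/gameOfLife | main.py | getCellsSet
-- ===== SOURCE A (Python) =====
-- def getCellsSet(leng, lastmatrics):
--     cellsset = set()
--     for i in range(len(lastmatrics)):
--         if lastmatrics[i] == 1:
--             j = []
--
--             if isOnEndOrStart(i, leng) == "end":
--                 j =[i - leng - 1,
--                         i - leng,
--                         i - leng + 1 - leng,
--                         i - 1,
--                         i + 1 - leng,
--                         i + leng - 1,
--                         i + leng,
--                         i + leng + 1 - leng]
--             elif isOnEndOrStart(i, leng) == "start":
--                 j =[i - leng - 1 + leng,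
--                         i - leng,
--                         i - leng + 1,
--                         i - 1 + leng,
--                         i + 1,
--                         i + leng - 1 + leng,
--                         i + leng,
--                         i + leng + 1]
--             else:
--                 j =[i - leng - 1,
--                         i - leng,
--                         i - leng + 1,
--                         i - 1,
--                         i + 1,
--                         i + leng - 1,
--                         i + leng,
--                         i + leng + 1]
--
--             for k in range(len(j)):
--                 if j[k] < 0:
--                     j[k] = j[k] + (leng*leng)
--                 elif j[k] > (leng*leng)-1:
--                     j[k] = j[k] - (leng*leng)
--             for k in j:
--                 cellsset.add(k)
--     return cellsset
--
-- def isOnEndOrStart(pointer, leng):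
--     if (pointer+1)%leng == 0:
--         return "end"
--     elif (pointer+1)%leng == 1:
--         return "start"
--     return None
-- ===== SOURCE B (Python) =====
-- def getCellsSet(leng, lastmatrics):
--     cellsset = set()
--     for i, v in enumerate(lastmatrics):
--         if v == 1:
--             r, c = i // leng, i % leng
--             for dr in (-1, 0, 1):
--                 for dc in (-1, 0, 1):
--                     if dr != 0 or dc != 0:
--                         cellsset.add(((r + dr) % leng) * leng + ((c + dc) % leng))
--     return cellsset
-- ===== Notes on version B (the rewrite author's own statement) =====
-- stated objective: simpler
-- what changed: Replaces the isOnEndOrStart start/end/middle branching plus the separate +-leng*leng wrap pass with one uniform loop over the eight (dr,dc) direction deltas using row/column modular arithmetic; Pre_ restricts to the natural torus domain (side >= 2 with every live cell inside the leng*leng grid, or no live cell at all), outside which A raises or its single +-leng*leng shift yields accidental out-of-grid indices.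
-- outside the precondition, e.g. on getCellsSet(1, [1]): A returns {0, -1}, B returns {0}; on getCellsSet(2, [0, 1, 0, 0, 1, 0, 1]): A returns {0, 1, 2, 3, 4, 5}, B returns {0, 1, 2, 3}; on getCellsSet(-2, [1]): A returns {1, 2, 3}, B returns {1, 2, -1}
import Mathlib
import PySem

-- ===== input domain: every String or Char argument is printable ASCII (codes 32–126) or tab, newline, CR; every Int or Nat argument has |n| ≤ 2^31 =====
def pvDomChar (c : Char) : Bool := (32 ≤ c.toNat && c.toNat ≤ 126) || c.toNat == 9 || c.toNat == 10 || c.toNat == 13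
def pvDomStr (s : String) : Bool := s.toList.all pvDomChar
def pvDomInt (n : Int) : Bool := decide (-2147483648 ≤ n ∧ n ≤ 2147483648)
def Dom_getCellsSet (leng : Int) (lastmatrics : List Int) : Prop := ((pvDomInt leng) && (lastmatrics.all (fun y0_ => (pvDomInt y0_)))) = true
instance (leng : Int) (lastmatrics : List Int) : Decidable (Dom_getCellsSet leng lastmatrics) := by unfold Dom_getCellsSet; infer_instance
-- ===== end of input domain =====

-- B replaces A's start/end/middle branching and ±leng² wrap pass by one uniform modular (row,col) neighbour loop; simpler, same cost.


-- ===== PORT A =====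
def isOnEndOrStart (pointer : Int) (leng : Int) : Option String :=
  if PySem.Int.mod (pointer + 1) leng = 0 then some "end"
  else if PySem.Int.mod (pointer + 1) leng = 1 then some "start"
  else none

def getCellsSet (leng : Int) (lastmatrics : List Int) : List Int :=
  (PySem.List.pyRange 0 (PySem.List.len lastmatrics) 1).foldl (fun cellsset i =>
    if PySem.List.pyGetD lastmatrics i 0 = 1 then
      let j : List Int :=
        if isOnEndOrStart i leng = some "end" then
          [i - leng - 1, i - leng, i - leng + 1 - leng, i - 1, i + 1 - leng,
           i + leng - 1, i + leng, i + leng + 1 - leng]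
        else if isOnEndOrStart i leng = some "start" then
          [i - leng - 1 + leng, i - leng, i - leng + 1, i - 1 + leng, i + 1,
           i + leng - 1 + leng, i + leng, i + leng + 1]
        else
          [i - leng - 1, i - leng, i - leng + 1, i - 1, i + 1,
           i + leng - 1, i + leng, i + leng + 1]
      let j2 := j.map (fun k =>
        if k < 0 then k + leng * leng
        else if k > leng * leng - 1 then k - leng * leng else k)
      j2.foldl (fun s k => PySem.Set.add s k) cellsset
    else cellsset) []

-- ===== PORT B =====
def getCellsSet_alt (leng : Int) (lastmatrics : List Int) : List Int :=
  (PySem.List.enumerate lastmatrics).foldl (fun cellsset iv =>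
    if iv.2 = 1 then
      let r := PySem.Int.floordiv iv.1 leng
      let c := PySem.Int.mod iv.1 leng
      [(-1 : Int), 0, 1].foldl (fun s dr =>
        [(-1 : Int), 0, 1].foldl (fun s dc =>
          if dr ≠ 0 ∨ dc ≠ 0 then
            PySem.Set.add s (PySem.Int.mod (r + dr) leng * leng + PySem.Int.mod (c + dc) leng)
          else s) s) cellsset
    else cellsset) []

-- ===== PRECONDITION & SPEC =====
-- Pre_ restricts to the natural torus domain — side ≥ 2 with every live cell inside the leng*leng grid,
-- or no live cell at all — outside it A raises (ZeroDivisionError for leng = 0 with a live cell) or its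
-- single ±leng*leng wrap yields accidental out-of-grid indices (e.g. -1 for leng = 1 or leng = -2).
def Pre_getCellsSet (leng : Int) (lastmatrics : List Int) : Prop :=
  (1 : Int) ∉ lastmatrics ∨ (2 ≤ leng ∧ ∀ p ∈ PySem.List.enumerate lastmatrics, p.2 = 1 → p.1 < leng * leng)
instance (leng : Int) (lastmatrics : List Int) : Decidable (Pre_getCellsSet leng lastmatrics) := by
  unfold Pre_getCellsSet; infer_instance

def pvWitness_getCellsSet : Int × List Int := (2, [1, 0, 0, 1])

def Spec_getCellsSet (leng : Int) (lastmatrics : List Int) (out : List Int) : Prop := out = getCellsSet_alt leng lastmatrics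
instance (leng : Int) (lastmatrics : List Int) (out : List Int) : Decidable (Spec_getCellsSet leng lastmatrics out) := by unfold Spec_getCellsSet; infer_instance

-- ===== CLAIM (what is proved, stated in full; the proofs are below) =====
def Claim_equal_getCellsSet : Prop := ∀ (leng : Int) (lastmatrics : List Int), Dom_getCellsSet leng lastmatrics → Pre_getCellsSet leng lastmatrics → Spec_getCellsSet leng lastmatrics (getCellsSet leng lastmatrics)

-- ===== LEMMAS AND PROOFS =====

lemma neg_one_emod (leng : Int) (hl : 2 ≤ leng) : (-1 : Int) % leng = leng - 1 := by
  rw [show (-1 : Int) = (leng - 1) + leng * (-1) by ring, Int.add_mul_emod_self_left]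
  exact Int.emod_eq_of_lt (by omega) (by omega)

lemma adjust_mod (leng ρ c' : Int) (hl : 2 ≤ leng) (hρ0 : -1 ≤ ρ) (hρ1 : ρ ≤ leng)
    (hc0 : 0 ≤ c') (hc1 : c' < leng) :
    (if leng * ρ + c' < 0 then leng * ρ + c' + leng * leng
     else if leng * ρ + c' > leng * leng - 1 then leng * ρ + c' - leng * leng
     else leng * ρ + c') = ρ % leng * leng + c' := by
  rcases lt_or_ge ρ 0 with h | h
  · have hρ : ρ = -1 := by omega
    subst hρ
    rw [neg_one_emod leng hl]
    have h1 : leng * (-1) + c' < 0 := by omega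
    rw [if_pos h1]; ring
  · rcases lt_or_ge ρ leng with h2 | h2
    · have hmod : ρ % leng = ρ := Int.emod_eq_of_lt h (by omega)
      rw [hmod]
      have hge : 0 ≤ leng * ρ := mul_nonneg (by omega) h
      have hle : leng * ρ ≤ leng * (leng - 1) := by
        apply mul_le_mul_of_nonneg_left (by omega) (by omega)
      have h1 : ¬ (leng * ρ + c' < 0) := by omega
      have h3 : ¬ (leng * ρ + c' > leng * leng - 1) := by nlinarith
      rw [if_neg h1, if_neg h3]; ring
    · have hρ : ρ = leng := by omega
      rw [hρ, Int.emod_self]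
      have hsq : 0 ≤ leng * leng := mul_nonneg (by omega) (by omega)
      have h1 : ¬ (leng * leng + c' < 0) := by omega
      have h3 : leng * leng + c' > leng * leng - 1 := by omega
      rw [if_neg h1, if_pos h3]; ring

lemma pos_eq (leng ρ c' X M : Int) (hl : 2 ≤ leng) (hρ0 : -1 ≤ ρ) (hρ1 : ρ ≤ leng)
    (hX : X = leng * ρ + c') (hc0 : 0 ≤ c') (hc1 : c' < leng) (hM : M = c') :
    (if X < 0 then X + leng * leng
     else if X > leng * leng - 1 then X - leng * leng else X) = ρ % leng * leng + M := by
  rw [hX, hM]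
  exact adjust_mod leng ρ c' hl hρ0 hρ1 hc0 hc1

lemma inner_expand (leng r c : Int) (s : List Int) :
    List.foldl (fun s dr => List.foldl (fun s dc =>
        if dr ≠ 0 ∨ dc ≠ 0 then
          PySem.Set.add s ((r + dr) % leng * leng + (c + dc) % leng)
        else s) s [-1, 0, 1]) s [-1, 0, 1]
    = List.foldl (fun s k => PySem.Set.add s k) s
        [(r + -1) % leng * leng + (c + -1) % leng,
         (r + -1) % leng * leng + (c + 0) % leng,
         (r + -1) % leng * leng + (c + 1) % leng,
         (r + 0) % leng * leng + (c + -1) % leng,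
         (r + 0) % leng * leng + (c + 1) % leng,
         (r + 1) % leng * leng + (c + -1) % leng,
         (r + 1) % leng * leng + (c + 0) % leng,
         (r + 1) % leng * leng + (c + 1) % leng] := by
  norm_num [List.foldl]

-- ===== VERDICT (by name: the statement is the Claim_ definition above) =====
theorem getCellsSet_spec : Claim_equal_getCellsSet := by
  intro leng l _ hpre
  unfold Spec_getCellsSet getCellsSet getCellsSet_alt
  rw [PySem.List.enumerate_eq_map_pyRange (d := 0)]
  rw [List.foldl_map]
  apply PySem.List.foldl_congr_mem'
  intro i hi s
  have hmem := (PySem.List.mem_pyRange_one).1 hi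
  have hi0 : 0 ≤ i := hmem.1
  have hilen : i < (l.length : Int) := by simpa [PySem.List.len_eq] using hmem.2
  dsimp only
  by_cases hv : PySem.List.pyGetD l i 0 = 1
  case neg => rw [if_neg hv, if_neg hv]
  case pos =>
  rw [if_pos hv, if_pos hv]
  have hknat : i.toNat < l.length := by omega
  have hget : PySem.List.pyGetD l i 0 = l[i.toNat] :=
    PySem.List.pyGetD_eq_getElem l 0 hi0 (by simpa [PySem.List.len_eq] using hilen)
  have h1mem : (1 : Int) ∈ l := by
    rw [hget] at hv; rw [← hv]; exact List.getElem_mem hknat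
  rcases hpre with hno | ⟨hl, hlive⟩
  · exact absurd h1mem hno
  have hpen : ((i, (1 : Int)) : Int × Int) ∈ PySem.List.enumerate l := by
    rw [PySem.List.mem_enumerate_iff]
    refine ⟨i.toNat, hknat, ?_⟩
    rw [hget] at hv
    refine Prod.ext ?_ ?_
    · simp; omega
    · simp [← hv]
  have hi1 : i < leng * leng := hlive (i, 1) hpen rfl
  have hpos : (0 : Int) < leng := by omega
  have hc0 : 0 ≤ i % leng := Int.emod_nonneg i (by omega)
  have hc1 : i % leng < leng := Int.emod_lt_of_pos i hpos
  have hr0 : 0 ≤ i / leng := Int.ediv_nonneg hi0 (by omega)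
  have hr1 : i / leng < leng := by
    by_contra h
    have h : leng ≤ i / leng := by omega
    have h2 : leng * leng ≤ leng * (i / leng) := mul_le_mul_of_nonneg_left h (by omega)
    have h3 := Int.mul_ediv_add_emod i leng
    linarith
  have heq : i = leng * (i / leng) + i % leng := (Int.mul_ediv_add_emod i leng).symm
  simp only [isOnEndOrStart, PySem.Int.mod_eq_emod_of_pos hpos,
    PySem.Int.floordiv_eq_ediv_of_pos hpos]
  generalize hR : i / leng = r at heq hr0 hr1 ⊢
  generalize hC : i % leng = c at heq hc0 hc1 ⊢
  rw [inner_expand leng r c s]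
  have hb1 : (i + 1) % leng = (c + 1) % leng := by
    conv_lhs => rw [show i + 1 = (c + 1) + leng * r from by rw [heq]; ring]
    rw [Int.add_mul_emod_self_left]
  by_cases hcs : c = 0
  case pos =>
    -- start column: c = 0
    subst hcs
    have hbv : (i + 1) % leng = 1 := by
      rw [hb1]; exact Int.emod_eq_of_lt (by omega) (by omega)
    rw [hbv]
    rw [if_neg (by omega : ¬ (1 : Int) = 0), if_pos rfl]
    rw [if_neg (by simp : ¬ (some "start" = some "end")), if_pos rfl]
    have hm1 : ((0 : Int) + -1) % leng = leng - 1 := by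
      rw [show (0 : Int) + -1 = -1 by ring]; exact neg_one_emod leng hl
    have hm2 : ((0 : Int) + 0) % leng = 0 := by
      norm_num
    have hm3 : ((0 : Int) + 1) % leng = 1 := by
      rw [show (0 : Int) + 1 = 1 by ring]; exact Int.emod_eq_of_lt (by omega) (by omega)
    apply congrArg
    simp only [List.map_cons, List.map_nil, List.cons.injEq, and_true]
    refine ⟨?_, ?_, ?_, ?_, ?_, ?_, ?_, ?_⟩
    · exact pos_eq leng (r + -1) (leng - 1) _ _ hl (by omega) (by omega) (by rw [heq]; ring) (by omega) (by omega) hm1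
    · exact pos_eq leng (r + -1) 0 _ _ hl (by omega) (by omega) (by rw [heq]; ring) (by omega) (by omega) hm2
    · exact pos_eq leng (r + -1) 1 _ _ hl (by omega) (by omega) (by rw [heq]; ring) (by omega) (by omega) hm3
    · exact pos_eq leng (r + 0) (leng - 1) _ _ hl (by omega) (by omega) (by rw [heq]; ring) (by omega) (by omega) hm1
    · exact pos_eq leng (r + 0) 1 _ _ hl (by omega) (by omega) (by rw [heq]; ring) (by omega) (by omega) hm3
    · exact pos_eq leng (r + 1) (leng - 1) _ _ hl (by omega) (by omega) (by rw [heq]; ring) (by omega) (by omega) hm1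
    · exact pos_eq leng (r + 1) 0 _ _ hl (by omega) (by omega) (by rw [heq]; ring) (by omega) (by omega) hm2
    · exact pos_eq leng (r + 1) 1 _ _ hl (by omega) (by omega) (by rw [heq]; ring) (by omega) (by omega) hm3
  case neg =>
  by_cases hce : c = leng - 1
  case pos =>
    -- end column: c = leng - 1
    subst hce
    have hbv : (i + 1) % leng = 0 := by
      rw [hb1, show leng - 1 + 1 = 0 + leng * 1 by ring, Int.add_mul_emod_self_left,
        Int.zero_emod]
    rw [hbv]
    rw [if_pos rfl, if_pos rfl]
    have hm1 : (leng - 1 + -1) % leng = leng - 2 := by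
      rw [show leng - 1 + -1 = leng - 2 by ring]
      exact Int.emod_eq_of_lt (by omega) (by omega)
    have hm2 : (leng - 1 + 0) % leng = leng - 1 := by
      rw [show leng - 1 + 0 = leng - 1 by ring]
      exact Int.emod_eq_of_lt (by omega) (by omega)
    have hm3 : (leng - 1 + 1) % leng = 0 := by
      rw [show leng - 1 + 1 = 0 + leng * 1 by ring, Int.add_mul_emod_self_left, Int.zero_emod]
    apply congrArg
    simp only [List.map_cons, List.map_nil, List.cons.injEq, and_true]
    refine ⟨?_, ?_, ?_, ?_, ?_, ?_, ?_, ?_⟩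
    · exact pos_eq leng (r + -1) (leng - 2) _ _ hl (by omega) (by omega) (by rw [heq]; ring) (by omega) (by omega) hm1
    · exact pos_eq leng (r + -1) (leng - 1) _ _ hl (by omega) (by omega) (by rw [heq]; ring) (by omega) (by omega) hm2
    · exact pos_eq leng (r + -1) 0 _ _ hl (by omega) (by omega) (by rw [heq]; ring) (by omega) (by omega) hm3
    · exact pos_eq leng (r + 0) (leng - 2) _ _ hl (by omega) (by omega) (by rw [heq]; ring) (by omega) (by omega) hm1
    · exact pos_eq leng (r + 0) 0 _ _ hl (by omega) (by omega) (by rw [heq]; ring) (by omega) (by omega) hm3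
    · exact pos_eq leng (r + 1) (leng - 2) _ _ hl (by omega) (by omega) (by rw [heq]; ring) (by omega) (by omega) hm1
    · exact pos_eq leng (r + 1) (leng - 1) _ _ hl (by omega) (by omega) (by rw [heq]; ring) (by omega) (by omega) hm2
    · exact pos_eq leng (r + 1) 0 _ _ hl (by omega) (by omega) (by rw [heq]; ring) (by omega) (by omega) hm3
  case neg =>
    -- middle column: 0 < c < leng - 1
    have hbv : (i + 1) % leng = c + 1 := by
      rw [hb1]; exact Int.emod_eq_of_lt (by omega) (by omega)
    rw [hbv]
    rw [if_neg (by omega : ¬ c + 1 = 0), if_neg (by omega : ¬ c + 1 = 1)]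
    rw [if_neg (by simp : ¬ (none = some "end")), if_neg (by simp : ¬ (none = some "start"))]
    have hm1 : (c + -1) % leng = c - 1 := by
      rw [show c + -1 = c - 1 by ring]
      exact Int.emod_eq_of_lt (by omega) (by omega)
    have hm2 : (c + 0) % leng = c := by
      rw [show c + 0 = c by ring]
      exact Int.emod_eq_of_lt (by omega) (by omega)
    have hm3 : (c + 1) % leng = c + 1 := by
      exact Int.emod_eq_of_lt (by omega) (by omega)
    apply congrArg
    simp only [List.map_cons, List.map_nil, List.cons.injEq, and_true]
    refine ⟨?_, ?_, ?_, ?_, ?_, ?_, ?_, ?_⟩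
    · exact pos_eq leng (r + -1) (c - 1) _ _ hl (by omega) (by omega) (by rw [heq]; ring) (by omega) (by omega) hm1
    · exact pos_eq leng (r + -1) c _ _ hl (by omega) (by omega) (by rw [heq]; ring) (by omega) (by omega) hm2
    · exact pos_eq leng (r + -1) (c + 1) _ _ hl (by omega) (by omega) (by rw [heq]; ring) (by omega) (by omega) hm3
    · exact pos_eq leng (r + 0) (c - 1) _ _ hl (by omega) (by omega) (by rw [heq]; ring) (by omega) (by omega) hm1
    · exact pos_eq leng (r + 0) (c + 1) _ _ hl (by omega) (by omega) (by rw [heq]; ring) (by omega) (by omega) hm3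
    · exact pos_eq leng (r + 1) (c - 1) _ _ hl (by omega) (by omega) (by rw [heq]; ring) (by omega) (by omega) hm1
    · exact pos_eq leng (r + 1) c _ _ hl (by omega) (by omega) (by rw [heq]; ring) (by omega) (by omega) hm2
    · exact pos_eq leng (r + 1) (c + 1) _ _ hl (by omega) (by omega) (by rw [heq]; ring) (by omega) (by omega) hm3
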